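-- pv_equiv track=rewrite | github.com/Maxtrix96/Programovanie2 | Python/mesto(19.10.2023 pisomka).py | passed_through_start
-- ===== SOURCE A (Python) =====
-- movementsX = ["V", "Z"]
--
-- movementsY = ["S", "J"]
--
-- def axis_X(movements): #pohyb po osi X
--     movement = 0
--     for move in movements:
--         if move in movementsX:
--             if move == "V":
--                 movement += 1
--             elif move == "Z":
--                 movement -= 1
--     return movement
--
-- def axis_Y(movements): #pohyb po osi Y
--     movement = 0
--     for move in movements:
--         if move in movementsY:
--             if move == "S":
--                 movement += 1
--             elif move == "J":
--                 movement -= 1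
--     return movement
--
-- def passed_through_start(movements): #kontrola ci prejde cez start
--     listOfMovements = []
--     stepByStep = []
--     currentPosition = [0, 0]
--
--     for i in range(len(movements)):
--         listOfMovements.append(movements[i])
--                                 #^ tu bola chyba, bolo tam listOfMovements.append(i), co len pridavalo cislo indexu
--                                 #a tym bola tato funkcia nefunkcna-vzdy vratila True, pretoze neskorsie podmienky nic vlastne neskontrolovali,
--                                 #takze nebola sanca vratit False
--
--     for positionChange in listOfMovements: #tvori list pocas pohybu
--         stepByStep.append(positionChange) #list sa meni po kazdom pohybu, skontroluje piziciu, ak je [0, 0], vrati True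
--         currentPosition[0] = axis_X(stepByStep)
--         currentPosition[1] = axis_Y(stepByStep)
--         if currentPosition == [0, 0]:
--             return ("\nCestovateľ taktiež prešiel cez štart!", True)
--     return ("\nCestovateľ neprešiel cez štart.", False) #ak predchadzajuci for loop zisti, ze sa cez start nepohne, vrati False - nepresiel cez start
-- ===== SOURCE B (Python) =====
-- def passed_through_start(movements):
--     x = 0
--     y = 0
--     for move in movements:
--         if move == "V":
--             x += 1
--         elif move == "Z":
--             x -= 1
--         elif move == "S":
--             y += 1
--         elif move == "J":
--             y -= 1
--         if x == 0 and y == 0: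
--             return ("\nCestovateľ taktiež prešiel cez štart!", True)
--     return ("\nCestovateľ neprešiel cez štart.", False)
-- ===== Notes on version B (the rewrite author's own statement) =====
-- stated objective: alternative
-- what changed: B keeps running (x,y) coordinates updated incrementally per move instead of re-running axis_X/axis_Y over the whole growing prefix after every step, removing the copy loop and both prefix rescans.
import Mathlib
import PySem

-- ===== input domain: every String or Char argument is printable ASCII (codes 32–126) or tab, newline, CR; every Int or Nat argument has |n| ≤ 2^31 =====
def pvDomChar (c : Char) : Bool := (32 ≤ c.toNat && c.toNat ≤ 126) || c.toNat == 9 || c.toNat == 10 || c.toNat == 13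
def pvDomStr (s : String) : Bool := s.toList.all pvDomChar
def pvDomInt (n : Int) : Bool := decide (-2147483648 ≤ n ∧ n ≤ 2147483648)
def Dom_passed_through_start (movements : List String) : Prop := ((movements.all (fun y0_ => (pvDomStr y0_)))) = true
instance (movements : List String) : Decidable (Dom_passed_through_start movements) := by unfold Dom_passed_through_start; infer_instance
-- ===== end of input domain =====

-- B replaces A's per-step rescan of the whole prefix (axis_X/axis_Y over a growing list)
-- by a single pass with running (x, y) coordinates; objective: alternative single-pass algorithm.

-- ===== PORT A =====
def pvMovementsX : List String := ["V", "Z"]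
def pvMovementsY : List String := ["S", "J"]

def pvAxisX (movements : List String) : Int :=
  movements.foldl (fun movement move =>
    if move ∈ pvMovementsX then
      if move = "V" then movement + 1
      else if move = "Z" then movement - 1
      else movement
    else movement) 0

def pvAxisY (movements : List String) : Int :=
  movements.foldl (fun movement move =>
    if move ∈ pvMovementsY then
      if move = "S" then movement + 1
      else if move = "J" then movement - 1
      else movement
    else movement) 0

-- A's second for-loop: carries the growing stepByStep list, recomputes both axes each step
def pvLoopA : List String → List String → String × Bool
  | [], _ => ("\nCestovateľ neprešiel cez štart.", false)
  | positionChange :: rest, stepByStep =>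
    let stepByStep2 := stepByStep ++ [positionChange]
    if pvAxisX stepByStep2 = 0 ∧ pvAxisY stepByStep2 = 0 then
      ("\nCestovateľ taktiež prešiel cez štart!", true)
    else pvLoopA rest stepByStep2

def passed_through_start (movements : List String) : String × Bool :=
  -- first for-loop: listOfMovements.append(movements[i]) over range(len(movements));
  -- index always in range, so pyGetD with a dummy default is exact here
  let listOfMovements := (PySem.List.pyRange 0 (movements.length : Int) 1).foldl
    (fun acc i => acc ++ [PySem.List.pyGetD movements i ""]) []
  pvLoopA listOfMovements []

-- ===== PORT B =====
def pvLoopB : List String → Int → Int → String × Bool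
  | [], _, _ => ("\nCestovateľ neprešiel cez štart.", false)
  | move :: rest, x, y =>
    let xy :=
      if move = "V" then (x + 1, y)
      else if move = "Z" then (x - 1, y)
      else if move = "S" then (x, y + 1)
      else if move = "J" then (x, y - 1)
      else (x, y)
    if xy.1 = 0 ∧ xy.2 = 0 then ("\nCestovateľ taktiež prešiel cez štart!", true)
    else pvLoopB rest xy.1 xy.2

def passed_through_start_alt (movements : List String) : String × Bool :=
  pvLoopB movements 0 0

-- ===== PRECONDITION & SPEC =====
def Spec_passed_through_start (movements : List String) (out : String × Bool) : Prop := out = passed_through_start_alt movements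
instance (movements : List String) (out : String × Bool) : Decidable (Spec_passed_through_start movements out) := by unfold Spec_passed_through_start; infer_instance

-- ===== CLAIM (what is proved, stated in full; the proofs are below) =====
def Claim_equal_passed_through_start : Prop := ∀ (movements : List String), Dom_passed_through_start movements → Spec_passed_through_start movements (passed_through_start movements)

-- ===== LEMMAS AND PROOFS =====
theorem pvAxisX_append (s : List String) (m : String) :
    pvAxisX (s ++ [m]) = if m = "V" then pvAxisX s + 1 else if m = "Z" then pvAxisX s - 1 else pvAxisX s := by
  simp [pvAxisX, List.foldl_append, pvMovementsX]
  split_ifs <;> simp_all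

theorem pvAxisY_append (s : List String) (m : String) :
    pvAxisY (s ++ [m]) = if m = "S" then pvAxisY s + 1 else if m = "J" then pvAxisY s - 1 else pvAxisY s := by
  simp [pvAxisY, List.foldl_append, pvMovementsY]
  split_ifs <;> simp_all

theorem pvLoopA_eq_pvLoopB (rest : List String) :
    ∀ step, pvLoopA rest step = pvLoopB rest (pvAxisX step) (pvAxisY step) := by
  induction rest with
  | nil => intro step; rfl
  | cons m rest ih =>
    intro step
    simp only [pvLoopA, pvLoopB, pvAxisX_append, pvAxisY_append]
    by_cases h1 : m = "V" <;> by_cases h2 : m = "Z" <;> by_cases h3 : m = "S" <;>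
      by_cases h4 : m = "J" <;>
      simp_all [pvAxisX_append, pvAxisY_append]

theorem listOfMovements_eq (movements : List String) :
    (PySem.List.pyRange 0 (movements.length : Int) 1).foldl
      (fun acc i => acc ++ [PySem.List.pyGetD movements i ""]) [] = movements := by
  rw [PySem.List.foldl_pyRange_zero_pyGetD' movements "" (fun acc v => acc ++ [v]) []]
  induction movements with
  | nil => rfl
  | cons a l ih => simpa using ih

-- ===== VERDICT (by name: the statement is the Claim_ definition above) =====
theorem passed_through_start_spec : Claim_equal_passed_through_start := by
  intro movements _
  unfold Spec_passed_through_start passed_through_start passed_through_start_alt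
  rw [listOfMovements_eq]
  exact pvLoopA_eq_pvLoopB movements []
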